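-- pv_equiv track=rewrite | github.com/TTMichaelA/advent_of_code | 2019/day06.py | orbit_tree_recur
-- ===== SOURCE A (Python) =====
-- def orbit_tree_recur(orbit_graph, value, tgt):
--     downstream_value = value
--     if tgt not in orbit_graph.keys():
--         return value
--     else:
--         for new in orbit_graph[tgt]:
--             downstream_value += orbit_tree_recur(orbit_graph, value + 1, new)
--     return downstream_value
-- ===== SOURCE B (Python) =====
-- def orbit_tree_recur(orbit_graph, value, tgt):
--     total = 0
--     frontier = [tgt]
--     depth = value
--     while frontier:
--         total += depth * len(frontier)
--         frontier = [child for node in frontier for child in orbit_graph.get(node, [])]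
--         depth += 1
--     return total
-- ===== Notes on version B (the rewrite author's own statement) =====
-- stated objective: alternative
-- what changed: Per-node tree recursion summing downstream values replaced by an iterative breadth-first level sweep that adds depth*len(frontier) once per level and expands the whole frontier at a time.
import Mathlib
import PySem

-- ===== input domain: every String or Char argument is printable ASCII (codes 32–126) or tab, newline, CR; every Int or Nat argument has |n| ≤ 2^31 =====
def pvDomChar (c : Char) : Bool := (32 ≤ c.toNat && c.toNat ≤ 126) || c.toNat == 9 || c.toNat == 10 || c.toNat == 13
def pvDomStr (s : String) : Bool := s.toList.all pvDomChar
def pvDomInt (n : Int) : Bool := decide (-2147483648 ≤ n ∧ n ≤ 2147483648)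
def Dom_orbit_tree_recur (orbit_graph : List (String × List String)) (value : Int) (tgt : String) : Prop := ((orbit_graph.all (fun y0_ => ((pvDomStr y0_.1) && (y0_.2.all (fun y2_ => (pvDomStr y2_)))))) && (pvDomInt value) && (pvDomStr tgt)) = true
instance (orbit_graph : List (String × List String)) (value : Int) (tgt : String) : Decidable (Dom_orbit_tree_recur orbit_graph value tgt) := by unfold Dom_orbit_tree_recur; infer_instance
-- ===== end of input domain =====

-- B replaces the per-node tree recursion by an iterative breadth-first level sweep
-- (adds depth*len(frontier) per level); equivalence is proved on inputs where A's
-- Python recursion terminates (no orbit cycle reachable from tgt).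

-- shared dict primitive: Python 'orbit_graph[tgt]' / 'tgt in orbit_graph.keys()' (exact via PySem.Dict)
def pvLookup (g : List (String × List String)) (t : String) : Option (List String) :=
  PySem.Dict.get? (PySem.Dict.mk g) t

-- number of graph keys not on the path 'path' (only keys are ever put on a path)
def pvRem (g : List (String × List String)) (path : List String) : Nat :=
  ((g.map Prod.fst).filter (fun k => decide (k ∉ path))).length

-- 'no orbit cycle is reachable from t': walks key-distinct paths out of t and rejects iff some
-- graph key repeats on a path.  A path of distinct keys has length ≤ g.length, so with fuel
-- g.length + 1 the fuel-0 branch is unreachable; the predicate computes no orbit values.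
def pvNoCycleFrom (g : List (String × List String)) : Nat → List String → String → Bool
  | 0, _, _ => false
  | n + 1, path, t =>
    if t ∈ path then false
    else (PySem.Dict.getD (PySem.Dict.mk g) t []).all (fun c => pvNoCycleFrom g n (t :: path) c)

-- ===== PORT A =====
-- literal port of A's recursion; the 'seen' path set is only a totality guard
-- (the 'tgt ∈ seen' branch is unreachable when Pre_ holds, where Python A returns)
theorem pvFilter_lt (l s : List String) (t : String) (ht : t ∈ l) (hs : t ∉ s) :
    (l.filter (fun k => decide (k ∉ t :: s))).length < (l.filter (fun k => decide (k ∉ s))).length := by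
  induction l with
  | nil => cases ht
  | cons a l ih =>
    have hsub : (l.filter (fun k => decide (k ∉ t :: s))).length ≤ (l.filter (fun k => decide (k ∉ s))).length :=
      List.Sublist.length_le (List.monotone_filter_right l
        (fun x h => by
          simp only [decide_eq_true_eq, List.mem_cons, not_or] at h ⊢
          exact h.2))
    rcases List.mem_cons.mp ht with rfl | hmem
    · rw [List.filter_cons_of_neg (by simp), List.filter_cons_of_pos (by simp [hs])]
      simp only [List.length_cons]
      omega
    · by_cases h2 : a ∈ s
      · rw [List.filter_cons_of_neg (by simp [h2]), List.filter_cons_of_neg (by simp [h2])]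
        exact ih hmem
      · by_cases h1 : a = t
        · subst h1
          rw [List.filter_cons_of_neg (by simp), List.filter_cons_of_pos (by simp [h2])]
          simp only [List.length_cons]
          omega
        · rw [List.filter_cons_of_pos (by simp [h1, h2]), List.filter_cons_of_pos (by simp [h2])]
          simp only [List.length_cons]
          exact Nat.succ_lt_succ (ih hmem)

theorem pvRem_lt (g : List (String × List String)) (s : List String) (t : String)
    (ht : t ∈ g.map Prod.fst) (hs : t ∉ s) : pvRem g (t :: s) < pvRem g s :=
  pvFilter_lt (g.map Prod.fst) s t ht hs

theorem pvLookup_mem (g : List (String × List String)) (t : String) (cs : List String)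
    (h : pvLookup g t = some cs) : t ∈ g.map Prod.fst := by
  induction g with
  | nil => simp [pvLookup, PySem.Dict.get?] at h
  | cons p g ih =>
    rw [pvLookup] at h
    rcases p with ⟨k, v⟩
    rw [PySem.Dict.get?_mk_cons] at h
    by_cases hk : k == t
    · simp only [List.map_cons, List.mem_cons]
      exact Or.inl (eq_of_beq hk).symm
    · simp only [hk, Bool.false_eq_true, if_false] at h
      exact List.mem_cons_of_mem _ (ih h)

def orbitGoA (g : List (String × List String)) (seen : List String) (value : Int) (tgt : String) : Int :=
  match h : pvLookup g tgt with
  | none => value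
  | some cs =>
    if tgt ∈ seen then value
    else cs.foldl (fun downstream_value new => downstream_value + orbitGoA g (tgt :: seen) (value + 1) new) value
termination_by pvRem g seen
decreasing_by exact pvRem_lt g seen tgt (pvLookup_mem g tgt cs h) (by assumption)

def orbit_tree_recur (orbit_graph : List (String × List String)) (value : Int) (tgt : String) : Int :=
  orbitGoA orbit_graph [] value tgt

-- ===== PORT B =====
-- literal port of Source B's while loop; fuel (g.length + 2) is only a totality guard,
-- never reached when Pre_ holds (each level steps one deeper along key-distinct paths)
def orbitGoB (g : List (String × List String)) : Nat → List String → Int → Int → Int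
  | 0, _, _, total => total
  | n + 1, frontier, depth, total =>
    match frontier with
    | [] => total
    | _ :: _ =>
      orbitGoB g n (frontier.flatMap (fun node => PySem.Dict.getD (PySem.Dict.mk g) node []))
        (depth + 1) (total + depth * (frontier.length : Int))

def orbit_tree_recur_alt (orbit_graph : List (String × List String)) (value : Int) (tgt : String) : Int :=
  orbitGoB orbit_graph (orbit_graph.length + 2) [tgt] value 0

-- ===== PRECONDITION & SPEC =====
-- Pre_: no orbit cycle among the graph's keys is reachable from tgt — exactly the inputs on
-- which Python A's recursion terminates (on a reachable cycle it recurses forever).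
def Pre_orbit_tree_recur (orbit_graph : List (String × List String)) (value : Int) (tgt : String) : Prop :=
  pvNoCycleFrom orbit_graph (orbit_graph.length + 1) [] tgt = true
instance (orbit_graph : List (String × List String)) (value : Int) (tgt : String) : Decidable (Pre_orbit_tree_recur orbit_graph value tgt) := by unfold Pre_orbit_tree_recur; infer_instance

def pvWitness_orbit_tree_recur : (List (String × List String)) × Int × String :=
  ([("COM", ["B", "C"]), ("B", ["D"])], 0, "COM")

def Spec_orbit_tree_recur (orbit_graph : List (String × List String)) (value : Int) (tgt : String) (out : Int) : Prop := out = orbit_tree_recur_alt orbit_graph value tgt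
instance (orbit_graph : List (String × List String)) (value : Int) (tgt : String) (out : Int) : Decidable (Spec_orbit_tree_recur orbit_graph value tgt out) := by unfold Spec_orbit_tree_recur; infer_instance

-- ===== CLAIM (what is proved, stated in full; the proofs are below) =====
def Claim_equal_orbit_tree_recur : Prop := ∀ (orbit_graph : List (String × List String)) (value : Int) (tgt : String), Dom_orbit_tree_recur orbit_graph value tgt → Pre_orbit_tree_recur orbit_graph value tgt → Spec_orbit_tree_recur orbit_graph value tgt (orbit_tree_recur orbit_graph value tgt)

-- ===== LEMMAS AND PROOFS =====

theorem pvRem_le (g : List (String × List String)) (s : List String) : pvRem g s ≤ g.length := by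
  unfold pvRem
  calc ((g.map Prod.fst).filter _).length ≤ (g.map Prod.fst).length := List.length_filter_le _ _
    _ = g.length := List.length_map ..

theorem pvRem_pos (g : List (String × List String)) (s : List String) (t : String)
    (ht : t ∈ g.map Prod.fst) (hs : t ∉ s) : 1 ≤ pvRem g s := by
  unfold pvRem
  have : t ∈ (g.map Prod.fst).filter (fun k => decide (k ∉ s)) :=
    List.mem_filter.mpr ⟨ht, by simpa using hs⟩
  exact List.length_pos_of_mem this

theorem pvGetD_of_lookup_none (g : List (String × List String)) (t : String)
    (h : pvLookup g t = none) : PySem.Dict.getD (PySem.Dict.mk g) t [] = [] :=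
  PySem.Dict.getD_of_get?_eq_none _ [] h

theorem pvGetD_of_lookup_some (g : List (String × List String)) (t : String) (cs : List String)
    (h : pvLookup g t = some cs) : PySem.Dict.getD (PySem.Dict.mk g) t [] = cs :=
  PySem.Dict.getD_of_get?_eq_some _ [] h

-- pvNoCycleFrom holds with ANY sufficient fuel and any smaller path set
theorem pvNoCycle_mono (g : List (String × List String)) :
    ∀ (m n : Nat) (s s' : List String) (t : String), pvRem g s' < m → (∀ x ∈ s', x ∈ s) →
      pvNoCycleFrom g n s t = true → pvNoCycleFrom g m s' t = true := by
  intro m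
  induction m with
  | zero => intro n s s' t hm _ _; omega
  | succ m ih =>
    intro n s s' t hm hsub h
    cases n with
    | zero => simp [pvNoCycleFrom] at h
    | succ n =>
      rw [pvNoCycleFrom] at h
      have hts : t ∉ s := by intro hts; simp [hts] at h
      have hts' : t ∉ s' := fun hx => hts (hsub _ hx)
      rw [pvNoCycleFrom, if_neg hts']
      rw [if_neg hts, List.all_eq_true] at h
      rw [List.all_eq_true]
      intro c hc
      cases hl : pvLookup g t with
      | none => rw [pvGetD_of_lookup_none g t hl] at hc; cases hc
      | some cs =>
        have hkey : t ∈ g.map Prod.fst := pvLookup_mem g t cs hl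
        have hrem : pvRem g (t :: s') < m := by
          have := pvRem_lt g s' t hkey hts'
          omega
        exact ih n (t :: s) (t :: s') c hrem
          (fun x hx => by rcases List.mem_cons.mp hx with rfl | hx
                          · exact List.mem_cons_self
                          · exact List.mem_cons_of_mem _ (hsub _ hx))
          (h c hc)

-- non-dependent unfolding lemma (orbitGoA uses a dependent match for termination)
theorem orbitGoA_def (g : List (String × List String)) (seen : List String) (value : Int) (tgt : String) :
    orbitGoA g seen value tgt = match pvLookup g tgt with
      | none => value
      | some cs =>
        if tgt ∈ seen then value
        else cs.foldl (fun downstream_value new => downstream_value + orbitGoA g (tgt :: seen) (value + 1) new) value := by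
  rw [orbitGoA]
  split
  · next heq => rw [heq]
  · next cs heq => rw [heq]

-- reference fueled recursion (proof device)
def orbitRef (g : List (String × List String)) : Nat → Int → String → Int
  | 0, v, _ => v
  | n + 1, v, t =>
    match pvLookup g t with
    | none => v
    | some cs => cs.foldl (fun d c => d + orbitRef g n (v + 1) c) v

theorem orbitGoA_eq_ref (g : List (String × List String)) :
    ∀ (n m : Nat) (s : List String) (v : Int) (t : String),
      pvNoCycleFrom g m s t = true → pvRem g s ≤ n → orbitGoA g s v t = orbitRef g n v t := by
  intro n
  induction n with
  | zero =>
    intro m s v t hac hn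
    rw [orbitGoA_def, orbitRef]
    cases hl : pvLookup g t with
    | none => rfl
    | some cs =>
      cases m with
      | zero => simp [pvNoCycleFrom] at hac
      | succ m =>
        rw [pvNoCycleFrom] at hac
        have hts : t ∉ s := by intro hts; simp [hts] at hac
        exact absurd hn (by have := pvRem_pos g s t (pvLookup_mem g t cs hl) hts; omega)
  | succ n ih =>
    intro m s v t hac hn
    rw [orbitGoA_def, orbitRef]
    cases hl : pvLookup g t with
    | none => rfl
    | some cs =>
      cases m with
      | zero => simp [pvNoCycleFrom] at hac
      | succ m =>
        rw [pvNoCycleFrom] at hac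
        have hts : t ∉ s := by intro hts; simp [hts] at hac
        rw [if_neg hts, List.all_eq_true, pvGetD_of_lookup_some g t cs hl] at hac
        simp only [hts, if_false]
        apply PySem.List.foldl_congr_mem
        intro acc c hc
        congr 1
        have hrem : pvRem g (t :: s) ≤ n := by
          have := pvRem_lt g s t (pvLookup_mem g t cs hl) hts
          omega
        exact ih m (t :: s) (v + 1) c (hac c hc) hrem

-- goA is independent of the path set wherever no cycle is reachable
theorem orbitGoA_seen_irrel (g : List (String × List String)) (m : Nat) (s : List String) (v : Int) (t : String)
    (hac : pvNoCycleFrom g m s t = true) : orbitGoA g s v t = orbitGoA g [] v t := by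
  have hac0 : pvNoCycleFrom g (g.length + 1) [] t = true :=
    pvNoCycle_mono g (g.length + 1) m s [] t (by have := pvRem_le g []; omega) (by simp) hac
  rw [orbitGoA_eq_ref g g.length m s v t hac (pvRem_le g s),
      orbitGoA_eq_ref g g.length (g.length + 1) [] v t hac0 (pvRem_le g [])]

theorem orbitGoA_unfold_sum (g : List (String × List String)) (v : Int) (t : String) (m : Nat)
    (hac : pvNoCycleFrom g (m + 1) [] t = true) :
    orbitGoA g [] v t
      = v + ((PySem.Dict.getD (PySem.Dict.mk g) t []).map (fun c => orbitGoA g [] (v + 1) c)).sum := by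
  rw [pvNoCycleFrom, if_neg (List.not_mem_nil), List.all_eq_true] at hac
  rw [orbitGoA_def]
  cases hl : pvLookup g t with
  | none => simp [pvGetD_of_lookup_none g t hl]
  | some cs =>
    rw [pvGetD_of_lookup_some g t cs hl] at hac ⊢
    simp only [List.not_mem_nil, if_false]
    rw [PySem.List.foldl_add]
    refine congrArg (fun l => v + List.sum l) (List.map_congr_left ?_)
    intro c hc
    exact orbitGoA_seen_irrel g m [t] (v + 1) c (hac c hc)

theorem pvSum_flatMap_map {α β : Type} (l : List α) (f : α → List β) (h : β → Int) :
    ((l.flatMap f).map h).sum = (l.map (fun a => ((f a).map h).sum)).sum := by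
  induction l with
  | nil => rfl
  | cons a l ih => simp [List.flatMap_cons, ih]

theorem pvSum_map_add_const (l : List String) (d : Int) (h : String → Int) :
    (l.map (fun t => d + h t)).sum = d * (l.length : Int) + (l.map h).sum := by
  induction l with
  | nil => simp
  | cons a l ih => simp [ih]; ring

-- the level sweep computes the sum of A's recursion over the frontier
theorem orbitGoB_eq (g : List (String × List String)) :
    ∀ (n : Nat) (frontier : List String) (depth total : Int),
      (∀ t ∈ frontier, ∃ s m, pvNoCycleFrom g m s t = true ∧ pvRem g s < n) →
      orbitGoB g n frontier depth total
        = total + (frontier.map (fun t => orbitGoA g [] depth t)).sum := by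
  intro n
  induction n with
  | zero =>
    intro frontier depth total hinv
    have : frontier = [] := by
      cases frontier with
      | nil => rfl
      | cons a l => obtain ⟨s, m, _, hlt⟩ := hinv a List.mem_cons_self; omega
    simp [this, orbitGoB]
  | succ n ih =>
    intro frontier depth total hinv
    cases hf : frontier with
    | nil => simp [orbitGoB]
    | cons a l =>
      rw [← hf]
      have hstep : orbitGoB g (n + 1) frontier depth total
          = orbitGoB g n (frontier.flatMap (fun node => PySem.Dict.getD (PySem.Dict.mk g) node []))
              (depth + 1) (total + depth * (frontier.length : Int)) := by
        rw [hf]; rfl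
      rw [hstep]
      -- invariant for the expanded frontier
      have hinv' : ∀ c ∈ frontier.flatMap (fun node => PySem.Dict.getD (PySem.Dict.mk g) node []),
          ∃ s m, pvNoCycleFrom g m s c = true ∧ pvRem g s < n := by
        intro c hc
        obtain ⟨t, ht, hct⟩ := List.mem_flatMap.mp hc
        obtain ⟨s, m, hac, hlt⟩ := hinv t ht
        cases hl : pvLookup g t with
        | none => rw [pvGetD_of_lookup_none g t hl] at hct; cases hct
        | some cs =>
          rw [pvGetD_of_lookup_some g t cs hl] at hct
          cases m with
          | zero => simp [pvNoCycleFrom] at hac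
          | succ m =>
            rw [pvNoCycleFrom] at hac
            have hts : t ∉ s := by intro hts; simp [hts] at hac
            rw [if_neg hts, List.all_eq_true, pvGetD_of_lookup_some g t cs hl] at hac
            refine ⟨t :: s, m, hac c hct, ?_⟩
            have := pvRem_lt g s t (pvLookup_mem g t cs hl) hts
            omega
      rw [ih _ (depth + 1) _ hinv']
      -- arithmetic: per-node unfolding of goA
      have hnodes : frontier.map (fun t => orbitGoA g [] depth t)
          = frontier.map (fun t => depth
              + ((PySem.Dict.getD (PySem.Dict.mk g) t []).map (fun c => orbitGoA g [] (depth + 1) c)).sum) := by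
        apply List.map_congr_left
        intro t ht
        obtain ⟨s, m, hac, _⟩ := hinv t ht
        have hac0 : pvNoCycleFrom g (g.length + 1) [] t = true :=
          pvNoCycle_mono g (g.length + 1) m s [] t (by have := pvRem_le g []; omega) (by simp) hac
        exact orbitGoA_unfold_sum g depth t g.length hac0
      rw [hnodes, pvSum_map_add_const, pvSum_flatMap_map]
      ring

-- ===== VERDICT (by name: the statement is the Claim_ definition above) =====
theorem orbit_tree_recur_spec : Claim_equal_orbit_tree_recur := by
  intro g v t _ hpre
  show orbit_tree_recur g v t = orbit_tree_recur_alt g v t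
  rw [orbit_tree_recur, orbit_tree_recur_alt]
  rw [orbitGoB_eq g (g.length + 2) [t] v 0
    (by intro x hx
        rcases List.mem_cons.mp hx with rfl | h
        · exact ⟨[], g.length + 1, hpre, by have := pvRem_le g []; omega⟩
        · cases h)]
  simp
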